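-- pv_equiv track=rewrite | github.com/ItakEjgo/DataMining | function.py | con_increase
-- ===== SOURCE A (Python) =====
-- INF = 1e9
--
-- def con_increase(data):
--     l = len(data)
--     pre = -INF
--     con = 1
--     res = {}
--     for i in range(l):
--         if data[i] > pre:
--             con += 1
--         else:
--             for j in range(1, con + 1):
--                 if j not in res:
--                     res[j] = con + 1 - j
--                 else:
--                     res[j] += con + 1 - j
--             con = 1
--         pre = data[i]
--     return res
-- ===== SOURCE B (Python) =====
-- def con_increase(data):
--     # Phase 1: detect breaks, collecting the 'con' value at each break
--     # (the final unflushed run is intentionally not collected, like A).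
--     runs = []
--     con = 1
--     pre = -1e9
--     for x in data:
--         if x > pre:
--             con += 1
--         else:
--             runs.append(con)
--             con = 1
--         pre = x
--     # Phase 2: histogram of run values, then one weighted accumulation
--     # per DISTINCT run value.
--     hist = {}
--     for c in runs:
--         hist[c] = hist.get(c, 0) + 1
--     res = {}
--     for c, m in hist.items():
--         for j in range(1, c + 1):
--             res[j] = res.get(j, 0) + m * (c + 1 - j)
--     return res
-- ===== Notes on version B (the rewrite author's own statement) =====
-- stated objective: faster
-- what changed: A flushes each increasing run into the dict the moment it breaks (inner accumulation loop re-run per break); B first collects the break-time run values in one pass, histograms them, and then does one weighted accumulation per DISTINCT run length (adding multiplicity * (c+1-j)), separating detection from accumulation.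
import Mathlib
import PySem

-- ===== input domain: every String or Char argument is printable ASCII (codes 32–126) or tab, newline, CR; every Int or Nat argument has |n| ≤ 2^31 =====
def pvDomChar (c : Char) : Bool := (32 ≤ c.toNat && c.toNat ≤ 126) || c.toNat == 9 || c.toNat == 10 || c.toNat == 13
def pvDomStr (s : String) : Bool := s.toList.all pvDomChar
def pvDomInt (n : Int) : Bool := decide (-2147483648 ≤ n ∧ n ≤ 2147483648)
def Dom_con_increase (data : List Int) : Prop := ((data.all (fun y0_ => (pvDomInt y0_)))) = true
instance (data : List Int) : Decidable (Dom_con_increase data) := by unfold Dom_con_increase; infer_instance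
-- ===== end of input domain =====

-- B separates run detection from accumulation and aggregates equal run lengths through a
-- histogram before the weighted flush, running the inner accumulation once per distinct length (measured faster).
-- (pre = -INF = -1e9: on the Dom (|n| ≤ 2^31) the float comparison data[i] > -1e9 is exactly
--  the integer comparison with -1000000000, since these integers are exact as doubles.)

-- ===== PORT A =====
def con_increase (data : List Int) : List (Int × Int) :=
  let l : Int := PySem.List.len data
  let st : Int × Int × PySem.Dict Int Int :=
    (PySem.List.pyRange 0 l 1).foldl
      (fun s i =>
        let pre := s.1; let con := s.2.1; let res := s.2.2
        let x := PySem.List.pyGetD data i 0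
        if x > pre then
          (x, con + 1, res)
        else
          (x, 1,
            (PySem.List.pyRange 1 (con + 1) 1).foldl
              (fun r j =>
                match r.get? j with
                | none => r.insert j (con + 1 - j)
                | some v => r.insert j (v + (con + 1 - j)))
              res))
      (-1000000000, 1, PySem.Dict.empty)
  st.2.2.items

-- ===== PORT B =====
def con_increase_alt (data : List Int) : List (Int × Int) :=
  let st : Int × Int × List Int :=
    data.foldl
      (fun s x =>
        let pre := s.1; let con := s.2.1; let runs := s.2.2
        if x > pre then (x, con + 1, runs) else (x, 1, runs ++ [con]))
      (-1000000000, 1, [])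
  let runs := st.2.2
  let hist : PySem.Dict Int Int :=
    runs.foldl (fun d c => d.insert c (d.getD c 0 + 1)) PySem.Dict.empty
  let res : PySem.Dict Int Int :=
    hist.items.foldl
      (fun r p =>
        (PySem.List.pyRange 1 (p.1 + 1) 1).foldl
          (fun r j => r.insert j (r.getD j 0 + p.2 * (p.1 + 1 - j))) r)
      PySem.Dict.empty
  res.items

-- ===== PRECONDITION & SPEC =====
def Spec_con_increase (data : List Int) (out : List (Int × Int)) : Prop := out = con_increase_alt data
instance (data : List Int) (out : List (Int × Int)) : Decidable (Spec_con_increase data out) := by unfold Spec_con_increase; infer_instance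

-- ===== CLAIM (what is proved, stated in full; the proofs are below) =====
def Claim_equal_con_increase : Prop := ∀ (data : List Int), Dom_con_increase data → Spec_con_increase data (con_increase data)

-- ===== LEMMAS AND PROOFS =====

-- proof-side helpers
def pvStepA (s : Int × Int × PySem.Dict Int Int) (x : Int) : Int × Int × PySem.Dict Int Int :=
  if x > s.1 then (x, s.2.1 + 1, s.2.2)
  else (x, 1,
    (PySem.List.pyRange 1 (s.2.1 + 1) 1).foldl
      (fun r j =>
        match r.get? j with
        | none => r.insert j (s.2.1 + 1 - j)
        | some v => r.insert j (v + (s.2.1 + 1 - j)))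
      s.2.2)

def pvStepB (s : Int × Int × List Int) (x : Int) : Int × Int × List Int :=
  if x > s.1 then (x, s.2.1 + 1, s.2.2) else (x, 1, s.2.2 ++ [s.2.1])

def pvFlush (w : Int → Int) (c : Int) (d : PySem.Dict Int Int) : PySem.Dict Int Int :=
  (PySem.List.pyRange 1 (c + 1) 1).foldl (fun r j => r.insert j (r.getD j 0 + w j)) d

def pvRuns : Int → Int → List Int → List Int
  | _, _, [] => []
  | pre, con, x :: t => if x > pre then pvRuns x (con + 1) t else con :: pvRuns x 1 t

theorem pv_match_eq (con : Int) :
    (fun (r : PySem.Dict Int Int) (j : Int) =>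
      match r.get? j with
      | none => r.insert j (con + 1 - j)
      | some v => r.insert j (v + (con + 1 - j)))
    = fun r j => r.insert j (r.getD j 0 + (con + 1 - j)) := by
  funext r j
  cases h : r.get? j with
  | none => simp [PySem.Dict.getD_eq_get?_getD, h]
  | some v => simp [PySem.Dict.getD_eq_get?_getD, h]

theorem pv_A_runs (t : List Int) : ∀ (pre con : Int) (d : PySem.Dict Int Int),
    (t.foldl pvStepA (pre, con, d)).2.2
      = (pvRuns pre con t).foldl (fun d c => pvFlush (fun j => c + 1 - j) c d) d := by
  induction t with
  | nil => intro pre con d; simp [pvRuns]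
  | cons x t ih =>
    intro pre con d
    by_cases h : x > pre
    · simp only [List.foldl_cons, pvStepA, pvRuns, if_pos h]
      exact ih x (con + 1) d
    · simp only [List.foldl_cons, pvStepA, pvRuns, if_neg h]
      rw [ih x 1 _]
      have hfl : (PySem.List.pyRange 1 (con + 1) 1).foldl
          (fun (r : PySem.Dict Int Int) (j : Int) =>
            match r.get? j with
            | none => r.insert j (con + 1 - j)
            | some v => r.insert j (v + (con + 1 - j))) d
          = pvFlush (fun j => con + 1 - j) con d := by
        unfold pvFlush
        rw [pv_match_eq con]
      rw [hfl]

theorem pv_B_runs (t : List Int) : ∀ (pre con : Int) (rs : List Int),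
    (t.foldl pvStepB (pre, con, rs)).2.2 = rs ++ pvRuns pre con t := by
  induction t with
  | nil => intro pre con rs; simp [pvRuns]
  | cons x t ih =>
    intro pre con rs
    by_cases h : x > pre
    · simp only [List.foldl_cons, pvStepB, pvRuns, if_pos h]
      exact ih x (con + 1) rs
    · simp only [List.foldl_cons, pvStepB, pvRuns, if_neg h]
      rw [ih x 1 _]
      simp

theorem pv_runs_pos (t : List Int) : ∀ (pre con : Int), 1 ≤ con →
    ∀ c ∈ pvRuns pre con t, 1 ≤ c := by
  induction t with
  | nil => intro pre con _ c hc; simp [pvRuns] at hc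
  | cons x t ih =>
    intro pre con hcon c hc
    unfold pvRuns at hc
    split at hc
    · exact ih x (con + 1) (by omega) c hc
    · rcases List.mem_cons.mp hc with rfl | hmem
      · exact hcon
      · exact ih x 1 le_rfl c hmem

theorem pv_update_subset (xs : List Int) : ∀ (s : List Int), (∀ x ∈ xs, x ∈ s) →
    PySem.Set.update s xs = s := by
  induction xs with
  | nil => intro s _; rfl
  | cons x t ih =>
    intro s h
    have hx : x ∈ s := h x (by simp)
    show PySem.Set.update (PySem.Set.add s x) t = s
    have hadd : PySem.Set.add s x = s := by
      simp [PySem.Set.add, PySem.Set.contains, hx]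
    rw [hadd]
    exact ih s (fun y hy => h y (by simp [hy]))

theorem pv_update_fresh (xs : List Int) : ∀ (s : List Int), xs.Nodup → (∀ x ∈ xs, x ∉ s) →
    PySem.Set.update s xs = s ++ xs := by
  induction xs with
  | nil => intro s _ _; simp [PySem.Set.update]
  | cons x t ih =>
    intro s hn h
    show PySem.Set.update (PySem.Set.add s x) t = s ++ x :: t
    have hadd : PySem.Set.add s x = s ++ [x] := by
      simp [PySem.Set.add, PySem.Set.contains, h x (by simp)]
    rw [hadd, ih (s ++ [x]) (List.nodup_cons.mp hn).2]
    · simp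
    · intro y hy
      simp only [List.mem_append, List.mem_singleton]
      rintro (hs | rfl)
      · exact h y (by simp [hy]) hs
      · exact (List.nodup_cons.mp hn).1 hy

theorem pv_update_append (s xs ys : List Int) :
    PySem.Set.update s (xs ++ ys) = PySem.Set.update (PySem.Set.update s xs) ys :=
  List.foldl_append

theorem pv_update_range (M c : Int) (hM : 0 ≤ M) (_hc : 1 ≤ c) :
    PySem.Set.update (PySem.List.pyRange 1 (M + 1) 1) (PySem.List.pyRange 1 (c + 1) 1)
      = PySem.List.pyRange 1 (max M c + 1) 1 := by
  by_cases h : c ≤ M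
  · rw [pv_update_subset]
    · congr 1; omega
    · intro x hx
      rw [PySem.List.mem_pyRange_one] at *
      omega
  · rw [PySem.List.pyRange_one_append 1 (M + 1) (c + 1) (by omega) (by omega),
        pv_update_append,
        pv_update_subset _ _ (fun x hx => hx),
        pv_update_fresh]
    · rw [← PySem.List.pyRange_one_append 1 (M + 1) (c + 1) (by omega) (by omega)]
      congr 1; omega
    · exact PySem.List.nodup_pyRange_one _ _
    · intro x hx hx'
      rw [PySem.List.mem_pyRange_one] at hx hx'
      omega

theorem pv_keys_flush (w : Int → Int) (c : Int) (d : PySem.Dict Int Int) :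
    (pvFlush w c d).keys = PySem.Set.update d.keys (PySem.List.pyRange 1 (c + 1) 1) :=
  PySem.Dict.keys_foldl_insert _ _ _

theorem pv_keys_fold {α : Type} (l : List α) (key : α → Int) (w : α → Int → Int) :
    ∀ (d : PySem.Dict Int Int) (M : Int), 0 ≤ M →
    d.keys = PySem.List.pyRange 1 (M + 1) 1 → (∀ a ∈ l, 1 ≤ key a) →
    (l.foldl (fun r a => pvFlush (w a) (key a) r) d).keys
      = PySem.List.pyRange 1 (l.foldl (fun m a => max m (key a)) M + 1) 1 := by
  induction l with
  | nil => intro d M _ hk _; simpa using hk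
  | cons a t ih =>
    intro d M hM hk hpos
    simp only [List.foldl_cons]
    rw [ih (pvFlush (w a) (key a) d) (max M (key a)) (le_trans hM (le_max_left _ _))]
    · rw [pv_keys_flush, hk, pv_update_range M (key a) hM (hpos a (by simp))]
    · exact fun b hb => hpos b (by simp [hb])

theorem pv_getD_insert_fold (ks : List Int) (w : Int → Int) :
    ∀ (d : PySem.Dict Int Int) (j : Int), ks.Nodup →
    (ks.foldl (fun r x => r.insert x (r.getD x 0 + w x)) d).getD j 0
      = d.getD j 0 + if j ∈ ks then w j else 0 := by
  induction ks with
  | nil => intro d j _; simp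
  | cons x t ih =>
    intro d j hn
    simp only [List.foldl_cons]
    rw [ih _ j (List.nodup_cons.mp hn).2]
    by_cases hj : j = x
    · subst hj
      have hnt : j ∉ t := (List.nodup_cons.mp hn).1
      simp [hnt, PySem.Dict.getD_insert_self]
    · by_cases hm : j ∈ t <;>
        simp [PySem.Dict.getD_insert, hj, hm]

theorem pv_getD_flush (w : Int → Int) (c : Int) (d : PySem.Dict Int Int) (j : Int) :
    (pvFlush w c d).getD j 0 = d.getD j 0 + if 1 ≤ j ∧ j ≤ c then w j else 0 := by
  unfold pvFlush
  rw [pv_getD_insert_fold _ _ _ _ (PySem.List.nodup_pyRange_one _ _)]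
  congr 1
  by_cases h : 1 ≤ j ∧ j ≤ c
  · rw [if_pos h, if_pos (PySem.List.mem_pyRange_one.mpr ⟨h.1, by omega⟩)]
  · rw [if_neg h, if_neg]
    intro hm
    rw [PySem.List.mem_pyRange_one] at hm
    exact h ⟨hm.1, by omega⟩

theorem pv_getD_fold {α : Type} (l : List α) (key : α → Int) (w : α → Int → Int) :
    ∀ (d : PySem.Dict Int Int) (j : Int),
    (l.foldl (fun r a => pvFlush (w a) (key a) r) d).getD j 0
      = d.getD j 0 + (l.map (fun a => if 1 ≤ j ∧ j ≤ key a then w a j else 0)).sum := by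
  induction l with
  | nil => intro d j; simp
  | cons a t ih =>
    intro d j
    simp only [List.foldl_cons, List.map_cons, List.sum_cons]
    rw [ih, pv_getD_flush]
    ring

theorem pv_foldl_max_congr (l l' : List Int) (M : Int) (h : ∀ x, x ∈ l ↔ x ∈ l') :
    l.foldl max M = l'.foldl max M := by
  have h1 : ∀ (a b : List Int), (∀ x ∈ a, x ∈ b) → a.foldl max M ≤ b.foldl max M := by
    intro a b hab
    rcases PySem.List.foldl_max_mem a M with he | hm
    · rw [he]; exact (PySem.List.le_foldl_max b M).1
    · exact (PySem.List.le_foldl_max b M).2 _ (hab _ hm)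
  exact le_antisymm (h1 _ _ fun x hx => (h x).1 hx) (h1 _ _ fun x hx => (h x).2 hx)

theorem pv_sum_count (runs : List Int) (f : Int → Int) :
    ((PySem.Set.ofList runs).map (fun c => (runs.count c : Int) * f c)).sum
      = (runs.map f).sum := by
  rw [Finset.sum_list_map_count runs f,
      ← List.sum_toFinset _ (PySem.Set.nodup_ofList runs)]
  have hts : (PySem.Set.ofList runs).toFinset = runs.toFinset := by
    apply Finset.ext
    intro x
    simp [PySem.Set.mem_ofList]
  rw [hts]
  apply Finset.sum_congr rfl
  intro m _
  simp

theorem pv_main (runs : List Int) (hpos : ∀ c ∈ runs, 1 ≤ c) :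
    (runs.foldl (fun d c => pvFlush (fun j => c + 1 - j) c d) PySem.Dict.empty).items
      = ((PySem.Dict.counter runs).items.foldl
          (fun r p => pvFlush (fun j => p.2 * (p.1 + 1 - j)) p.1 r) PySem.Dict.empty).items := by
  have hposB : ∀ p ∈ (PySem.Dict.counter runs).items, 1 ≤ p.1 := by
    intro p hp
    rw [PySem.Dict.items_counter] at hp
    rcases List.mem_map.mp hp with ⟨c, hc, rfl⟩
    exact hpos c ((PySem.Set.mem_ofList runs c).mp hc)
  have hke : (PySem.Dict.empty : PySem.Dict Int Int).keys
      = PySem.List.pyRange 1 ((0 : Int) + 1) 1 := by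
    rw [PySem.Dict.keys_empty, PySem.List.pyRange_one_eq_nil (show (0:Int) + 1 ≤ 1 by omega)]
  have hkA : (runs.foldl (fun d c => pvFlush (fun j => c + 1 - j) c d) PySem.Dict.empty).keys
      = PySem.List.pyRange 1 (runs.foldl (fun m c => max m c) 0 + 1) 1 :=
    pv_keys_fold runs (fun c => c) (fun c j => c + 1 - j) PySem.Dict.empty 0 le_rfl hke hpos
  have hkB : ((PySem.Dict.counter runs).items.foldl
        (fun r p => pvFlush (fun j => p.2 * (p.1 + 1 - j)) p.1 r) PySem.Dict.empty).keys
      = PySem.List.pyRange 1 ((PySem.Dict.counter runs).items.foldl (fun m p => max m p.1) 0 + 1) 1 :=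
    pv_keys_fold (PySem.Dict.counter runs).items (fun p => p.1)
      (fun p j => p.2 * (p.1 + 1 - j)) PySem.Dict.empty 0 le_rfl hke hposB
  have hmax : (PySem.Dict.counter runs).items.foldl (fun m p => max m p.1) 0
      = runs.foldl (fun m c => max m c) 0 := by
    have h1 : (PySem.Dict.counter runs).items.foldl (fun m p => max m p.1) 0
        = ((PySem.Dict.counter runs).items.map (fun p => p.1)).foldl max 0 :=
      (List.foldl_map).symm
    have h2 : ((PySem.Dict.counter runs).items.map (fun p => p.1)) = PySem.Set.ofList runs := by
      simp [PySem.Dict.items_counter, Function.comp_def]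
    rw [h1, h2]
    exact pv_foldl_max_congr _ _ _ (fun x => PySem.Set.mem_ofList runs x)
  rw [hmax] at hkB
  have hget : ∀ j : Int,
      (runs.foldl (fun d c => pvFlush (fun j => c + 1 - j) c d) PySem.Dict.empty).getD j 0
        = ((PySem.Dict.counter runs).items.foldl
            (fun r p => pvFlush (fun j => p.2 * (p.1 + 1 - j)) p.1 r) PySem.Dict.empty).getD j 0 := by
    intro j
    have hA : (runs.foldl (fun d c => pvFlush (fun j => c + 1 - j) c d) PySem.Dict.empty).getD j 0
        = (PySem.Dict.empty : PySem.Dict Int Int).getD j 0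
          + (runs.map (fun c => if 1 ≤ j ∧ j ≤ c then c + 1 - j else 0)).sum :=
      pv_getD_fold runs (fun c => c) (fun c j => c + 1 - j) PySem.Dict.empty j
    have hB : ((PySem.Dict.counter runs).items.foldl
          (fun r p => pvFlush (fun j => p.2 * (p.1 + 1 - j)) p.1 r) PySem.Dict.empty).getD j 0
        = (PySem.Dict.empty : PySem.Dict Int Int).getD j 0
          + ((PySem.Dict.counter runs).items.map
              (fun p => if 1 ≤ j ∧ j ≤ p.1 then p.2 * (p.1 + 1 - j) else 0)).sum :=
      pv_getD_fold (PySem.Dict.counter runs).items (fun p => p.1)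
        (fun p j => p.2 * (p.1 + 1 - j)) PySem.Dict.empty j
    rw [hA, hB, PySem.Dict.getD_empty, PySem.Dict.items_counter, List.map_map]
    congr 1
    rw [← pv_sum_count runs (fun c => if 1 ≤ j ∧ j ≤ c then c + 1 - j else 0)]
    congr 1
    apply List.map_congr_left
    intro c _
    simp only [Function.comp]
    by_cases h : 1 ≤ j ∧ j ≤ c <;> simp [h]
  rw [PySem.Dict.items_eq_map_keys _ (by rw [hkA]; exact PySem.List.nodup_pyRange_one _ _) 0,
      PySem.Dict.items_eq_map_keys _ (by rw [hkB]; exact PySem.List.nodup_pyRange_one _ _) 0,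
      hkA, hkB]
  apply List.map_congr_left
  intro k _
  rw [hget k]

-- ===== VERDICT (by name: the statement is the Claim_ definition above) =====
theorem con_increase_spec : Claim_equal_con_increase := by
  intro data _
  show con_increase data = con_increase_alt data
  unfold con_increase con_increase_alt
  show ((PySem.List.pyRange 0 (PySem.List.len data) 1).foldl
      (fun acc j => pvStepA acc (PySem.List.pyGetD data j 0))
      ((-1000000000 : Int), (1 : Int), (PySem.Dict.empty : PySem.Dict Int Int))).2.2.items
    = (((data.foldl pvStepB ((-1000000000 : Int), (1 : Int), ([] : List Int))).2.2.foldl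
        (fun d c => d.insert c (d.getD c 0 + 1)) PySem.Dict.empty).items.foldl
        (fun r p => pvFlush (fun j => p.2 * (p.1 + 1 - j)) p.1 r) PySem.Dict.empty).items
  rw [PySem.List.foldl_pyRange_zero_pyGetD data 0 pvStepA,
      pv_A_runs data (-1000000000) 1 PySem.Dict.empty,
      pv_B_runs data (-1000000000) 1 [],
      List.nil_append,
      PySem.Dict.foldl_insert_getD_add_one_eq_counter]
  exact pv_main _ (pv_runs_pos data (-1000000000) 1 le_rfl)
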